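-- pv_equiv track=rewrite | github.com/tafokints/langraph_ranker_sample | src/langgraph_app.py | _phd_is_disqualified
-- ===== SOURCE A (Python) =====
-- from typing import Any, Callable, Dict, List, Optional, Pattern, Sequence, Tuple
--
-- PHD_TITLE_TOKENS = ("phd", "ph.d", "ph. d", "doctor of philosophy", "doctorate", "d.phil")
--
-- PHD_DISQUALIFIER_TOKENS = (
--     "student", "candidate", "dropped out", "dropout", "unfinished",
--     "did not complete", "never completed", "leave of absence",
-- )
--
-- PHD_PROXIMITY_WINDOW = 30
--
-- def _iter_token_match_indices(haystack: str, token: str) -> List[int]: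
--     """All start-offsets of `token` in `haystack` (substring, already lowercased)."""
--     if not haystack or not token:
--         return []
--     matches: List[int] = []
--     current_index = 0
--     while True:
--         match_index = haystack.find(token, current_index)
--         if match_index < 0:
--             break
--         matches.append(match_index)
--         current_index = match_index + 1
--     return matches
--
-- def _phd_is_disqualified(combined_text: str) -> bool:
--     """True when a PhD mention is within `PHD_PROXIMITY_WINDOW` chars of a
--     disqualifier like "student" / "candidate" / "dropped out".
--
--     Prevents "PhD student" and "dropped out of the PhD program" from reading
--     as a completed doctorate.
--     """
--     for phd_token in PHD_TITLE_TOKENS: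
--         for phd_offset in _iter_token_match_indices(combined_text, phd_token):
--             window_start = max(0, phd_offset - PHD_PROXIMITY_WINDOW)
--             window_end = phd_offset + len(phd_token) + PHD_PROXIMITY_WINDOW
--             window_text = combined_text[window_start:window_end]
--             for disqualifier in PHD_DISQUALIFIER_TOKENS:
--                 if disqualifier in window_text:
--                     return True
--     return False
-- ===== SOURCE B (Python) =====
-- PHD_TITLE_TOKENS = ("phd", "ph.d", "ph. d", "doctor of philosophy", "doctorate", "d.phil")
--
-- PHD_DISQUALIFIER_TOKENS = (
--     "student", "candidate", "dropped out", "dropout", "unfinished",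
--     "did not complete", "never completed", "leave of absence",
-- )
--
-- PHD_PROXIMITY_WINDOW = 30
--
--
-- def _occurrences(text, token):
--     """All start offsets of `token` in `text`, by direct positional scan."""
--     k = len(token)
--     return [i for i in range(len(text)) if text[i:i + k] == token]
--
--
-- def _phd_is_disqualified(combined_text: str) -> bool:
--     # Build offset tables for both token families, then do a proximity join
--     # on offsets instead of slicing a window and re-searching inside it.
--     phd_matches = [(p, len(t)) for t in PHD_TITLE_TOKENS
--                    for p in _occurrences(combined_text, t)]
--     dis_matches = [(d, len(t)) for t in PHD_DISQUALIFIER_TOKENS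
--                    for d in _occurrences(combined_text, t)]
--     return any(
--         d >= p - PHD_PROXIMITY_WINDOW
--         and d + dl <= p + pl + PHD_PROXIMITY_WINDOW
--         for (p, pl) in phd_matches
--         for (d, dl) in dis_matches
--     )
-- ===== Notes on version B (the rewrite author's own statement) =====
-- stated objective: alternative
-- what changed: Replaces A's find-loop plus per-match window slicing and substring re-search by building offset tables of all token occurrences via a direct positional scan and then doing an arithmetic proximity join on the offsets.
import Mathlib
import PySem

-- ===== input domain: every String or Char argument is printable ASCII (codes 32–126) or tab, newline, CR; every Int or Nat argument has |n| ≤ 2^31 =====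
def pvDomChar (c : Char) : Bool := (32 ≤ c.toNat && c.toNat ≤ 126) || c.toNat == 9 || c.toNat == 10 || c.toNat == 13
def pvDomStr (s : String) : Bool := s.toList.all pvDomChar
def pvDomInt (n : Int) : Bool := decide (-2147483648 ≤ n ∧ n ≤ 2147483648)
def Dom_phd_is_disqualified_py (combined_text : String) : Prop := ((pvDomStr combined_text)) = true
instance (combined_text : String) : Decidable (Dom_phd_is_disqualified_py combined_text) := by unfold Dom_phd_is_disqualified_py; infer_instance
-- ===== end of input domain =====

-- B replaces A's find-loop + window slicing + substring re-search by offset tables built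
-- with a positional scan and an arithmetic proximity join on the offsets (objective: alternative).

-- ===== PORT A =====
def pvTitleTokens : List (List Char) :=
  ["phd".toList, "ph.d".toList, "ph. d".toList, "doctor of philosophy".toList,
   "doctorate".toList, "d.phil".toList]

def pvDisqTokens : List (List Char) :=
  ["student".toList, "candidate".toList, "dropped out".toList, "dropout".toList,
   "unfinished".toList, "did not complete".toList, "never completed".toList,
   "leave of absence".toList]

-- A's while-loop in `_iter_token_match_indices`; fuel `s.length + 1` is enough because each
-- found index m satisfies cur ≤ m < s.length, so `cur` strictly grows while staying ≤ s.length.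
def pvIterGo (s tok : List Char) (cur : Nat) (acc : List Nat) : Nat → List Nat
  | 0 => acc
  | fuel + 1 =>
    let m := PySem.Chars.findFrom s tok (cur : Int) none
    if m < 0 then acc
    else pvIterGo s tok (m.toNat + 1) (acc ++ [m.toNat]) fuel

def pvIterTokenMatchIndices (s tok : List Char) : List Nat :=
  if s.isEmpty || tok.isEmpty then [] else pvIterGo s tok 0 [] (s.length + 1)

def phd_is_disqualified_py (combined_text : String) : Bool :=
  let s := combined_text.toList
  pvTitleTokens.any (fun tok =>
    (pvIterTokenMatchIndices s tok).any (fun p =>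
      let windowStart : Int := max 0 ((p : Int) - 30)
      let windowEnd : Int := (p : Int) + tok.length + 30
      let window := PySem.List.slice s (some windowStart) (some windowEnd)
      pvDisqTokens.any (fun d => PySem.Chars.isIn d window)))

-- ===== PORT B =====
def pvOccurrences (s tok : List Char) : List Nat :=
  (List.range s.length).filter (fun i =>
    PySem.List.slice s (some (i : Int)) (some ((i : Int) + tok.length)) == tok)

def phd_is_disqualified_py_alt (combined_text : String) : Bool :=
  let s := combined_text.toList
  let phdMatches := pvTitleTokens.flatMap (fun t => (pvOccurrences s t).map (fun p => (p, t.length)))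
  let disMatches := pvDisqTokens.flatMap (fun t => (pvOccurrences s t).map (fun d => (d, t.length)))
  phdMatches.any (fun m => disMatches.any (fun h =>
    decide ((m.1 : Int) - 30 ≤ (h.1 : Int)) && decide ((h.1 : Int) + h.2 ≤ (m.1 : Int) + m.2 + 30)))

-- ===== PRECONDITION & SPEC =====
def Spec_phd_is_disqualified_py (combined_text : String) (out : Bool) : Prop := out = phd_is_disqualified_py_alt combined_text
instance (combined_text : String) (out : Bool) : Decidable (Spec_phd_is_disqualified_py combined_text out) := by unfold Spec_phd_is_disqualified_py; infer_instance

-- ===== CLAIM (what is proved, stated in full; the proofs are below) =====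
def Claim_equal_phd_is_disqualified_py : Prop := ∀ (combined_text : String), Dom_phd_is_disqualified_py combined_text → Spec_phd_is_disqualified_py combined_text (phd_is_disqualified_py combined_text)

-- ===== LEMMAS AND PROOFS =====

-- B's occurrence table holds exactly the prefix positions of `tok`.
lemma mem_pvOccurrences (s tok : List Char) (htok : tok ≠ []) (p : Nat) :
    p ∈ pvOccurrences s tok ↔ tok <+: s.drop p := by
  unfold pvOccurrences
  simp only [List.mem_filter, List.mem_range, PySem.List.slice_natCast_add, beq_iff_eq]
  constructor
  · rintro ⟨_, hc⟩
    exact List.prefix_iff_eq_take.mpr hc.symm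
  · intro hpre
    refine ⟨?_, (List.prefix_iff_eq_take.mp hpre).symm⟩
    by_contra hlt
    have hnil : s.drop p = [] := List.drop_eq_nil_iff.mpr (by omega)
    rw [hnil, List.prefix_nil] at hpre
    exact htok hpre

-- A's find-loop collects exactly the prefix positions ≥ cur (appended to acc).
lemma mem_pvIterGo (s tok : List Char) (htok : tok ≠ []) (fuel : Nat) :
    ∀ (cur : Nat) (acc : List Nat) (p : Nat), cur ≤ s.length → s.length + 1 ≤ fuel + cur →
      (p ∈ pvIterGo s tok cur acc fuel ↔ p ∈ acc ∨ (cur ≤ p ∧ tok <+: s.drop p)) := by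
  induction fuel with
  | zero => intro cur acc p hcur hfuel; omega
  | succ fuel ih =>
    intro cur acc p hcur hfuel
    rw [pvIterGo]
    simp only [PySem.Chars.findFrom_natCast s tok cur hcur]
    by_cases hneg : PySem.Chars.find (s.drop cur) tok = -1
    · have hno : ¬ tok <:+: s.drop cur := (PySem.Chars.find_eq_neg_one_iff _ _).mp hneg
      simp only [hneg, if_pos]
      norm_num
      intro hle hpre
      exfalso
      apply hno
      rw [← PySem.Chars.isIn_iff_infix, ← PySem.Chars.exists_prefix_drop_iff_isIn]
      exact ⟨p - cur, by rwa [List.drop_drop, Nat.add_sub_cancel' hle]⟩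
    · have hf0 : 0 ≤ PySem.Chars.find (s.drop cur) tok := by
        have := PySem.Chars.neg_one_le_find (s.drop cur) tok; omega
      set f := PySem.Chars.find (s.drop cur) tok with hf
      obtain ⟨hpre, hmin⟩ := PySem.Chars.find_spec (s := s.drop cur) (sub := tok) hf0
      rw [List.drop_drop] at hpre
      have hmlt : cur + f.toNat < s.length := by
        by_contra hge
        have hnil : s.drop (cur + f.toNat) = [] := List.drop_eq_nil_iff.mpr (by omega)
        rw [hnil, List.prefix_nil] at hpre
        exact htok hpre
      have hcond : ¬ ((cur : Int) + f < 0) := by omega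
      have htn : ((cur : Int) + f).toNat = cur + f.toNat := by omega
      simp only [hneg, reduceIte, if_neg hcond, htn]
      rw [ih (cur + f.toNat + 1) (acc ++ [cur + f.toNat]) p (by omega) (by omega)]
      simp only [List.mem_append, List.mem_singleton]
      constructor
      · rintro ((h | h) | ⟨hle, hp⟩)
        · exact Or.inl h
        · subst h; exact Or.inr ⟨by omega, hpre⟩
        · exact Or.inr ⟨by omega, hp⟩
      · rintro (h | ⟨hle, hp⟩)
        · exact Or.inl (Or.inl h)
        · rcases Nat.lt_or_ge p (cur + f.toNat) with hlt | hge
          · exfalso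
            apply hmin (p - cur) (by omega)
            rwa [List.drop_drop, Nat.add_sub_cancel' hle]
          · rcases Nat.eq_or_lt_of_le hge with heq | hgt
            · exact Or.inl (Or.inr heq.symm)
            · exact Or.inr ⟨by omega, hp⟩

lemma mem_pvIter (s tok : List Char) (htok : tok ≠ []) (p : Nat) :
    p ∈ pvIterTokenMatchIndices s tok ↔ tok <+: s.drop p := by
  unfold pvIterTokenMatchIndices
  by_cases hs : s = []
  · subst hs
    simp [List.prefix_nil, htok]
  · have hcond : (s.isEmpty || tok.isEmpty) = false := by
      simp [hs, htok]
    rw [hcond]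
    simp only [Bool.false_eq_true, if_false]
    rw [mem_pvIterGo s tok htok (s.length + 1) 0 [] p (by omega) (by omega)]
    simp only [List.not_mem_nil, false_or, Nat.zero_le, true_and]

-- The disqualifier is inside A's sliced window iff it occurs in s at an offset q
-- with p - 30 ≤ q and q + |d| ≤ p + k + 30.
lemma isIn_window (s d : List Char) (hd : d ≠ []) (p k : Nat) :
    PySem.Chars.isIn d (PySem.List.slice s (some (max 0 ((p : Int) - 30))) (some ((p : Int) + k + 30))) = true
      ↔ ∃ q : Nat, d <+: s.drop q ∧ (p : Int) - 30 ≤ q ∧ (q : Int) + d.length ≤ (p : Int) + k + 30 := by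
  have hdlen : 1 ≤ d.length := List.length_pos_iff.mpr hd
  have ha0 : (0 : Int) ≤ max 0 ((p : Int) - 30) := le_max_left _ _
  have hb0 : (0 : Int) ≤ (p : Int) + k + 30 := by positivity
  rw [PySem.List.slice_toNat s ha0 hb0, ← PySem.Chars.exists_prefix_drop_iff_isIn]
  set A := (max 0 ((p : Int) - 30)).toNat with hA
  set B := ((p : Int) + k + 30).toNat with hB
  have hAa : (A : Int) = max 0 ((p : Int) - 30) := Int.toNat_of_nonneg ha0
  have hBb : (B : Int) = (p : Int) + k + 30 := Int.toNat_of_nonneg hb0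
  have hA1 : (p : Int) - 30 ≤ (A : Int) := hAa ▸ le_max_right _ _
  constructor
  · rintro ⟨j, hj⟩
    rw [List.drop_take, List.drop_drop, List.prefix_take_iff] at hj
    obtain ⟨hp1, hp2⟩ := hj
    exact ⟨A + j, hp1, by push_cast; omega, by push_cast; omega⟩
  · rintro ⟨q, hq, h1, h2⟩
    have hAq : A ≤ q := by
      have : max 0 ((p : Int) - 30) ≤ (q : Int) := max_le (by positivity) h1
      omega
    refine ⟨q - A, ?_⟩
    rw [List.drop_take, List.drop_drop, Nat.add_sub_cancel' hAq, List.prefix_take_iff]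
    exact ⟨hq, by omega⟩

-- ===== VERDICT (by name: the statement is the Claim_ definition above) =====
theorem phd_is_disqualified_py_spec : Claim_equal_phd_is_disqualified_py := by
  intro ct _
  unfold Spec_phd_is_disqualified_py phd_is_disqualified_py phd_is_disqualified_py_alt
  have hT : ∀ t ∈ pvTitleTokens, t ≠ [] := by decide
  have hD : ∀ t ∈ pvDisqTokens, t ≠ [] := by decide
  rw [Bool.eq_iff_iff]
  simp only [List.any_eq_true, List.mem_flatMap, List.mem_map, Bool.and_eq_true, decide_eq_true_eq,
    Prod.exists]
  constructor
  · rintro ⟨tok, htokmem, p, hpmem, d, hdmem, hwin⟩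
    rw [mem_pvIter _ _ (hT tok htokmem)] at hpmem
    rw [isIn_window _ _ (hD d hdmem)] at hwin
    obtain ⟨q, hq, h1, h2⟩ := hwin
    refine ⟨p, tok.length, ⟨tok, htokmem, p, ?_, rfl⟩, q, d.length, ⟨d, hdmem, q, ?_, rfl⟩, h1, h2⟩
    · exact (mem_pvOccurrences ct.toList tok (hT tok htokmem) p).mpr hpmem
    · exact (mem_pvOccurrences ct.toList d (hD d hdmem) q).mpr hq
  · rintro ⟨a, b, ⟨tok, htokmem, p, hp', hpe⟩, c, e, ⟨d, hdmem, q, hq', hqe⟩, h1, h2⟩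
    injection hpe with ha hb
    injection hqe with hc he
    subst ha; subst hb; subst hc; subst he
    rw [mem_pvOccurrences ct.toList tok (hT tok htokmem)] at hp'
    rw [mem_pvOccurrences ct.toList d (hD d hdmem)] at hq'
    refine ⟨tok, htokmem, p, (mem_pvIter _ _ (hT tok htokmem) p).mpr hp', d, hdmem, ?_⟩
    exact (isIn_window _ _ (hD d hdmem) p tok.length).mpr ⟨q, hq', h1, h2⟩
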